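-- pv_equiv track=rewrite | github.com/sebhtml/Arc-Prize-2024-sebhtml | src/playout_simulation.py | translate_board
-- ===== SOURCE A (Python) =====
-- import copy
--
-- def translate_board(board, translation_x: int, translation_y: int, default_cell=0):
--     """
--     default_cell is 0 or Cell(0)
--     """
--     width = len(board[0])
--     height = len(board)
--     new_board = copy.deepcopy(board)
--     for x in range(width):
--         for y in range(height):
--             new_board[y][x] = default_cell
--     for src_x in range(width):
--         dst_x = src_x + translation_x
--         if dst_x < 0 or dst_x >= width:
--             continue
--         for src_y in range(height):
--             dst_y = src_y + translation_y
--             if dst_y < 0 or dst_y >= height: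
--                 continue
--             new_board[dst_y][dst_x] = copy.deepcopy(board[src_y][src_x])
--     return new_board
-- ===== SOURCE B (Python) =====
-- import copy
--
-- def translate_board(board, translation_x: int, translation_y: int, default_cell=0):
--     """
--     default_cell is 0 or Cell(0)
--     """
--     width = len(board[0])
--     height = len(board)
--     new_board = copy.deepcopy(board)
--     for y in range(height):
--         row = new_board[y]
--         src_y = y - translation_y
--         for x in range(width):
--             src_x = x - translation_x
--             if 0 <= src_x < width and 0 <= src_y < height:
--                 row[x] = copy.deepcopy(board[src_y][src_x])
--             else:
--                 row[x] = default_cell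
--     return new_board
-- ===== Notes on version B (the rewrite author's own statement) =====
-- stated objective: simpler
-- what changed: A blanks every cell and then forward-scatters each in-range source cell in a second double loop; B does a single pull-based pass that fills each destination cell directly from its inverse-translated source (or the default), eliminating the blanking pass.
import Mathlib
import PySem

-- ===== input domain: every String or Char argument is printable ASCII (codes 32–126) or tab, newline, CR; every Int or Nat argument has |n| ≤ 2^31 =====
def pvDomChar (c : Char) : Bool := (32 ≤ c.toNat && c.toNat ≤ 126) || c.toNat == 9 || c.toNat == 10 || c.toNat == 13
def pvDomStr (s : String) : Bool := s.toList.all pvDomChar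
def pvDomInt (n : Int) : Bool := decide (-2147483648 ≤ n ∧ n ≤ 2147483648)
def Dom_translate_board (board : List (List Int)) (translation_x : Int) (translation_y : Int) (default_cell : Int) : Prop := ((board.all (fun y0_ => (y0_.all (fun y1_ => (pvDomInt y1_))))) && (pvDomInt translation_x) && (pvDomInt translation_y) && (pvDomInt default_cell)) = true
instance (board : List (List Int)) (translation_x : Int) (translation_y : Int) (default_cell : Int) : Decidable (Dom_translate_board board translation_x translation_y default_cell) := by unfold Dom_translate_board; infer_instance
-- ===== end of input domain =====

-- B replaces A's two passes (blank every cell, then forward-scatter every source cell) by a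
-- single pull-based pass computing each destination cell from its inverse-translated source.
-- Objective: simpler (one pass, no pre-blanking); equal return value on Pre_.

-- ===== PORT A =====
-- Literal transliteration of A: copy.deepcopy is the identity on immutable Int boards;
-- new_board[y][x] = v becomes List.set; indexes used by A are in range under Pre_, so
-- List.getD is exact for board[src_y][src_x].
def translate_board (board : List (List Int)) (translation_x : Int) (translation_y : Int) (default_cell : Int) : List (List Int) :=
  let width := (board.headD []).length
  let height := board.length
  let new_board := board
  let new_board := (List.range width).foldl (fun (nb : List (List Int)) (x : Nat) =>
    (List.range height).foldl (fun (nb : List (List Int)) (y : Nat) =>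
      nb.set y ((nb.getD y []).set x default_cell)) nb) new_board
  (List.range width).foldl (fun (nb : List (List Int)) (src_x : Nat) =>
    if (src_x : Int) + translation_x < 0 ∨ (src_x : Int) + translation_x ≥ (width : Int) then nb
    else (List.range height).foldl (fun (nb : List (List Int)) (src_y : Nat) =>
      if (src_y : Int) + translation_y < 0 ∨ (src_y : Int) + translation_y ≥ (height : Int) then nb
      else nb.set ((src_y : Int) + translation_y).toNat
        ((nb.getD ((src_y : Int) + translation_y).toNat []).set ((src_x : Int) + translation_x).toNat
          ((board.getD src_y []).getD src_x 0))) nb) new_board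

-- ===== PORT B =====
-- Literal transliteration of Source B: one pass over destination rows and cells, pulling each
-- cell from its inverse-translated source (or default_cell); indexes in range under Pre_.
def translate_board_alt (board : List (List Int)) (translation_x : Int) (translation_y : Int) (default_cell : Int) : List (List Int) :=
  let width := (board.headD []).length
  let height := board.length
  (List.range height).foldl (fun (nb : List (List Int)) (y : Nat) =>
    (List.range width).foldl (fun (row : List Int) (x : Nat) =>
      if 0 ≤ (x : Int) - translation_x ∧ (x : Int) - translation_x < (width : Int) ∧
         0 ≤ (y : Int) - translation_y ∧ (y : Int) - translation_y < (height : Int) then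
        row.set x ((board.getD ((y : Int) - translation_y).toNat []).getD ((x : Int) - translation_x).toNat 0)
      else
        row.set x default_cell) (nb.getD y []) |> nb.set y) board

-- ===== PRECONDITION & SPEC =====
-- Pre_ excludes exactly the inputs on which Python A raises IndexError: the empty board
-- (board[0]) and ragged boards having a row shorter than row 0 (the blanking pass indexes it).
def Pre_translate_board (board : List (List Int)) (translation_x : Int) (translation_y : Int) (default_cell : Int) : Prop :=
  board ≠ [] ∧ ∀ row ∈ board, (board.headD []).length ≤ row.length
instance (board : List (List Int)) (translation_x : Int) (translation_y : Int) (default_cell : Int) : Decidable (Pre_translate_board board translation_x translation_y default_cell) := by unfold Pre_translate_board; infer_instance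
def pvWitness_translate_board : List (List Int) × Int × Int × Int := ([[1, 2], [3, 4]], 1, 0, 0)

def Spec_translate_board (board : List (List Int)) (translation_x : Int) (translation_y : Int) (default_cell : Int) (out : List (List Int)) : Prop := out = translate_board_alt board translation_x translation_y default_cell
instance (board : List (List Int)) (translation_x : Int) (translation_y : Int) (default_cell : Int) (out : List (List Int)) : Decidable (Spec_translate_board board translation_x translation_y default_cell out) := by unfold Spec_translate_board; infer_instance

-- ===== CLAIM (what is proved, stated in full; the proofs are below) =====
def Claim_equal_translate_board : Prop := ∀ (board : List (List Int)) (translation_x : Int) (translation_y : Int) (default_cell : Int), Dom_translate_board board translation_x translation_y default_cell → Pre_translate_board board translation_x translation_y default_cell → Spec_translate_board board translation_x translation_y default_cell (translate_board board translation_x translation_y default_cell)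

-- ===== LEMMAS AND PROOFS =====

-- Filling every column < k of a row with f x.
theorem pv_rowfill_length (f : Nat → Int) (k : Nat) (r : List Int) :
    ((List.range k).foldl (fun r x => r.set x (f x)) r).length = r.length := by
  induction k with
  | zero => rfl
  | succ k ih =>
    rw [List.range_succ, List.foldl_append, List.foldl_cons, List.foldl_nil, List.length_set]
    exact ih

theorem pv_rowfill_get? (f : Nat → Int) (k : Nat) (r : List Int) (j : Nat) :
    ((List.range k).foldl (fun r x => r.set x (f x)) r)[j]? =
      if j < k ∧ j < r.length then some (f j) else r[j]? := by
  induction k with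
  | zero => simp
  | succ k ih =>
    rw [List.range_succ, List.foldl_append, List.foldl_cons, List.foldl_nil,
      List.getElem?_set, pv_rowfill_length, ih]
    by_cases hj : k = j
    · subst hj
      rw [if_pos rfl]
      by_cases hl : k < r.length
      · rw [if_pos hl, if_pos (And.intro (Nat.lt_succ_self k) hl)]
      · rw [if_neg hl, if_neg (show ¬ (k < k + 1 ∧ k < r.length) by omega),
          List.getElem?_eq_none (show r.length ≤ k by omega)]
    · rw [if_neg hj]
      by_cases h2 : j < k ∧ j < r.length
      · rw [if_pos h2, if_pos (And.intro (by omega) h2.2)]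
      · rw [if_neg h2, if_neg (show ¬ (j < k + 1 ∧ j < r.length) by omega)]

-- Replacing every row < k of a list of rows by g y (current row y).
theorem pv_outer_length (g : Nat → List Int → List Int) (k : Nat) (nb : List (List Int)) :
    ((List.range k).foldl (fun nb y => nb.set y (g y (nb.getD y []))) nb).length = nb.length := by
  induction k with
  | zero => rfl
  | succ k ih =>
    rw [List.range_succ, List.foldl_append, List.foldl_cons, List.foldl_nil, List.length_set]
    exact ih

theorem pv_outer_get? (g : Nat → List Int → List Int) (k : Nat) (nb : List (List Int)) (j : Nat)
    (hk : k ≤ nb.length) :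
    ((List.range k).foldl (fun nb y => nb.set y (g y (nb.getD y []))) nb)[j]? =
      if j < k then some (g j (nb.getD j [])) else nb[j]? := by
  induction k generalizing j with
  | zero => simp
  | succ k ih =>
    rw [List.range_succ, List.foldl_append, List.foldl_cons, List.foldl_nil,
      List.getElem?_set, pv_outer_length]
    have hprevk : ((List.range k).foldl (fun nb y => nb.set y (g y (nb.getD y []))) nb)[k]? = nb[k]? := by
      rw [ih k (by omega), if_neg (by omega)]
    have hgd : ((List.range k).foldl (fun nb y => nb.set y (g y (nb.getD y []))) nb).getD k [] = nb.getD k [] := by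
      rw [List.getD_eq_getElem?_getD, hprevk, ← List.getD_eq_getElem?_getD]
    by_cases hj : k = j
    · subst hj
      rw [if_pos rfl, if_pos (by omega : k < nb.length), hgd, if_pos (by omega : k < k + 1)]
    · rw [if_neg hj, ih j (by omega)]
      by_cases h2 : j < k
      · rw [if_pos h2, if_pos (by omega : j < k + 1)]
      · rw [if_neg h2, if_neg (by omega : ¬ j < k + 1)]

-- A's blanking double loop equals mapping the row fill over the rows.
theorem pv_blank_eq (d : Int) (h : Nat) (k : Nat) (nb : List (List Int)) (hnb : nb.length = h) :
    (List.range k).foldl (fun nb x =>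
        (List.range h).foldl (fun nb y => nb.set y ((nb.getD y []).set x d)) nb) nb
      = nb.map (fun r => (List.range k).foldl (fun r x => r.set x d) r) := by
  induction k with
  | zero => simp
  | succ k ih =>
    rw [List.range_succ, List.foldl_append, List.foldl_cons, List.foldl_nil, ih]
    have hrw : (fun r : List Int => (List.range k ++ [k]).foldl (fun r x => r.set x d) r)
        = fun r => ((List.range k).foldl (fun r x => r.set x d) r).set k d := by
      funext r
      rw [List.foldl_append, List.foldl_cons, List.foldl_nil]
    rw [hrw]
    have hlam : (fun (nb : List (List Int)) (y : Nat) => nb.set y ((nb.getD y []).set k d))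
        = fun nb y => nb.set y ((fun (_ : Nat) (r : List Int) => r.set k d) y (nb.getD y [])) := rfl
    apply List.ext_getElem?
    intro j
    have hog := pv_outer_get? (fun _ r => r.set k d) h
      (List.map (fun r => List.foldl (fun r x => r.set x d) r (List.range k)) nb) j
      (by rw [List.length_map, hnb])
    rw [hlam, hog]
    by_cases hjh : j < h
    · rw [if_pos hjh, List.getElem?_map,
        List.getElem?_eq_getElem (l := nb) (by omega : j < nb.length)]
      rw [List.getD_eq_getElem?_getD, List.getElem?_map,
        List.getElem?_eq_getElem (l := nb) (by omega : j < nb.length)]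
      rfl
    · rw [if_neg hjh, List.getElem?_map, List.getElem?_map,
        List.getElem?_eq_none (show nb.length ≤ j by omega)]
      rfl

-- A's inner scatter loop for a fixed source column: destination rows pulled back by ty.
theorem pv_sin_length (board : List (List Int)) (ty : Int) (h : Nat) (dx : Int) (sx : Nat)
    (k : Nat) (nb : List (List Int)) :
    ((List.range k).foldl (fun (nb : List (List Int)) (src_y : Nat) =>
      if (src_y : Int) + ty < 0 ∨ (src_y : Int) + ty ≥ (h : Int) then nb
      else nb.set ((src_y : Int) + ty).toNat
        ((nb.getD ((src_y : Int) + ty).toNat []).set dx.toNat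
          ((board.getD src_y []).getD sx 0))) nb).length = nb.length := by
  induction k with
  | zero => rfl
  | succ k ih =>
    rw [List.range_succ, List.foldl_append, List.foldl_cons, List.foldl_nil]
    by_cases hg : (k : Int) + ty < 0 ∨ (k : Int) + ty ≥ (h : Int)
    · rw [if_pos hg]; exact ih
    · rw [if_neg hg, List.length_set]; exact ih

theorem pv_sin_get? (board : List (List Int)) (ty : Int) (h : Nat) (dx : Int) (sx : Nat)
    (k : Nat) (nb : List (List Int)) (y : Nat) (hnb : nb.length = h) :
    ((List.range k).foldl (fun (nb : List (List Int)) (src_y : Nat) =>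
      if (src_y : Int) + ty < 0 ∨ (src_y : Int) + ty ≥ (h : Int) then nb
      else nb.set ((src_y : Int) + ty).toNat
        ((nb.getD ((src_y : Int) + ty).toNat []).set dx.toNat
          ((board.getD src_y []).getD sx 0))) nb)[y]? =
      if ty ≤ (y : Int) ∧ (y : Int) - ty < (k : Int) ∧ y < h
      then some ((nb.getD y []).set dx.toNat
        ((board.getD ((y : Int) - ty).toNat []).getD sx 0))
      else nb[y]? := by
  induction k with
  | zero =>
    rw [List.range_zero, List.foldl_nil, if_neg (by push_cast; omega)]
  | succ k ih =>
    rw [List.range_succ, List.foldl_append, List.foldl_cons, List.foldl_nil]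
    by_cases hg : (k : Int) + ty < 0 ∨ (k : Int) + ty ≥ (h : Int)
    · rw [if_pos hg, ih]
      by_cases hc : ty ≤ (y : Int) ∧ (y : Int) - ty < (k : Int) ∧ y < h
      · rw [if_pos hc, if_pos (by push_cast at hc ⊢; omega)]
      · rw [if_neg hc, if_neg (by rcases hg with hg | hg <;> push_cast at hc ⊢ <;> omega)]
    · rw [if_neg hg]
      push Not at hg
      obtain ⟨hg1, hg2⟩ := hg
      rw [List.getElem?_set, pv_sin_length]
      by_cases he : ((k : Int) + ty).toNat = y
      · have hcf : ¬ (ty ≤ (y : Int) ∧ (y : Int) - ty < (k : Int) ∧ y < h) := by omega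
        have hp : ((List.range k).foldl (fun (nb : List (List Int)) (src_y : Nat) =>
            if (src_y : Int) + ty < 0 ∨ (src_y : Int) + ty ≥ (h : Int) then nb
            else nb.set ((src_y : Int) + ty).toNat
              ((nb.getD ((src_y : Int) + ty).toNat []).set dx.toNat
                ((board.getD src_y []).getD sx 0))) nb)[y]? = nb[y]? := by
          rw [ih, if_neg hcf]
        have hpd : ((List.range k).foldl (fun (nb : List (List Int)) (src_y : Nat) =>
            if (src_y : Int) + ty < 0 ∨ (src_y : Int) + ty ≥ (h : Int) then nb
            else nb.set ((src_y : Int) + ty).toNat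
              ((nb.getD ((src_y : Int) + ty).toNat []).set dx.toNat
                ((board.getD src_y []).getD sx 0))) nb).getD y []
            = nb.getD y [] := by
          rw [List.getD_eq_getElem?_getD, hp, ← List.getD_eq_getElem?_getD]
        rw [if_pos he, if_pos (show ((k : Int) + ty).toNat < nb.length by omega),
          he, hpd, if_pos (by omega), show ((y : Int) - ty).toNat = k by omega]
      · rw [if_neg he, ih]
        by_cases hc : ty ≤ (y : Int) ∧ (y : Int) - ty < (k : Int) ∧ y < h
        · rw [if_pos hc, if_pos (by omega)]
        · rw [if_neg hc, if_neg (by omega)]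

-- A's outer scatter loop over source columns.
theorem pv_sout_length (board : List (List Int)) (tx ty : Int) (w h : Nat)
    (k : Nat) (nb : List (List Int)) :
    ((List.range k).foldl (fun (nb : List (List Int)) (src_x : Nat) =>
      if (src_x : Int) + tx < 0 ∨ (src_x : Int) + tx ≥ (w : Int) then nb
      else (List.range h).foldl (fun (nb : List (List Int)) (src_y : Nat) =>
        if (src_y : Int) + ty < 0 ∨ (src_y : Int) + ty ≥ (h : Int) then nb
        else nb.set ((src_y : Int) + ty).toNat
          ((nb.getD ((src_y : Int) + ty).toNat []).set ((src_x : Int) + tx).toNat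
            ((board.getD src_y []).getD src_x 0))) nb) nb).length = nb.length := by
  induction k with
  | zero => rfl
  | succ k ih =>
    rw [List.range_succ, List.foldl_append, List.foldl_cons, List.foldl_nil]
    by_cases hg : (k : Int) + tx < 0 ∨ (k : Int) + tx ≥ (w : Int)
    · rw [if_pos hg]; exact ih
    · rw [if_neg hg, pv_sin_length]; exact ih

theorem pv_sin_rowlen (board : List (List Int)) (ty : Int) (h : Nat) (dx : Int) (sx : Nat)
    (k : Nat) (nb : List (List Int)) (y : Nat) (hnb : nb.length = h) :
    (((List.range k).foldl (fun (nb : List (List Int)) (src_y : Nat) =>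
      if (src_y : Int) + ty < 0 ∨ (src_y : Int) + ty ≥ (h : Int) then nb
      else nb.set ((src_y : Int) + ty).toNat
        ((nb.getD ((src_y : Int) + ty).toNat []).set dx.toNat
          ((board.getD src_y []).getD sx 0))) nb).getD y []).length
      = (nb.getD y []).length := by
  rw [List.getD_eq_getElem?_getD, pv_sin_get? board ty h dx sx k nb y hnb]
  by_cases hc : ty ≤ (y : Int) ∧ (y : Int) - ty < (k : Int) ∧ y < h
  · rw [if_pos hc, Option.getD_some, List.length_set]
  · rw [if_neg hc, ← List.getD_eq_getElem?_getD]

theorem pv_sout_rowlen (board : List (List Int)) (tx ty : Int) (w h : Nat)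
    (k : Nat) (nb : List (List Int)) (y : Nat) (hnb : nb.length = h) :
    (((List.range k).foldl (fun (nb : List (List Int)) (src_x : Nat) =>
      if (src_x : Int) + tx < 0 ∨ (src_x : Int) + tx ≥ (w : Int) then nb
      else (List.range h).foldl (fun (nb : List (List Int)) (src_y : Nat) =>
        if (src_y : Int) + ty < 0 ∨ (src_y : Int) + ty ≥ (h : Int) then nb
        else nb.set ((src_y : Int) + ty).toNat
          ((nb.getD ((src_y : Int) + ty).toNat []).set ((src_x : Int) + tx).toNat
            ((board.getD src_y []).getD src_x 0))) nb) nb).getD y []).length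
      = (nb.getD y []).length := by
  induction k with
  | zero => rfl
  | succ k ih =>
    rw [List.range_succ, List.foldl_append, List.foldl_cons, List.foldl_nil]
    by_cases hg : (k : Int) + tx < 0 ∨ (k : Int) + tx ≥ (w : Int)
    · rw [if_pos hg]; exact ih
    · rw [if_neg hg, pv_sin_rowlen board ty h ((k : Int) + tx) k h _ y
        (by rw [pv_sout_length]; exact hnb)]
      exact ih

theorem pv_sout_get? (board : List (List Int)) (tx ty : Int) (w h : Nat)
    (k : Nat) (nb : List (List Int)) (y j : Nat) (hy : y < h)
    (hnb : nb.length = h)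
    (hrowl : ∀ z, (nb.getD z []).length = (board.getD z []).length)
    (hw : ∀ z, z < h → w ≤ (board.getD z []).length) :
    (((List.range k).foldl (fun (nb : List (List Int)) (src_x : Nat) =>
      if (src_x : Int) + tx < 0 ∨ (src_x : Int) + tx ≥ (w : Int) then nb
      else (List.range h).foldl (fun (nb : List (List Int)) (src_y : Nat) =>
        if (src_y : Int) + ty < 0 ∨ (src_y : Int) + ty ≥ (h : Int) then nb
        else nb.set ((src_y : Int) + ty).toNat
          ((nb.getD ((src_y : Int) + ty).toNat []).set ((src_x : Int) + tx).toNat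
            ((board.getD src_y []).getD src_x 0))) nb) nb).getD y [])[j]? =
      if tx ≤ (j : Int) ∧ (j : Int) - tx < (k : Int) ∧ j < w ∧ ty ≤ (y : Int) ∧ (y : Int) - ty < (h : Int)
      then some ((board.getD ((y : Int) - ty).toNat []).getD ((j : Int) - tx).toNat 0)
      else (nb.getD y [])[j]? := by
  induction k with
  | zero =>
    rw [List.range_zero, List.foldl_nil, if_neg (by push_cast; omega)]
  | succ k ih =>
    rw [List.range_succ, List.foldl_append, List.foldl_cons, List.foldl_nil]
    by_cases hg : (k : Int) + tx < 0 ∨ (k : Int) + tx ≥ (w : Int)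
    · rw [if_pos hg, ih]
      by_cases hc : tx ≤ (j : Int) ∧ (j : Int) - tx < (k : Int) ∧ j < w ∧ ty ≤ (y : Int) ∧ (y : Int) - ty < (h : Int)
      · rw [if_pos hc, if_pos (by push_cast at hc ⊢; omega)]
      · rw [if_neg hc, if_neg (by rcases hg with hg | hg <;> push_cast at hc ⊢ <;> omega)]
    · rw [if_neg hg]
      push Not at hg
      obtain ⟨hg1, hg2⟩ := hg
      have hprevlen : ((List.range k).foldl (fun (nb : List (List Int)) (src_x : Nat) =>
          if (src_x : Int) + tx < 0 ∨ (src_x : Int) + tx ≥ (w : Int) then nb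
          else (List.range h).foldl (fun (nb : List (List Int)) (src_y : Nat) =>
            if (src_y : Int) + ty < 0 ∨ (src_y : Int) + ty ≥ (h : Int) then nb
            else nb.set ((src_y : Int) + ty).toNat
              ((nb.getD ((src_y : Int) + ty).toNat []).set ((src_x : Int) + tx).toNat
                ((board.getD src_y []).getD src_x 0))) nb) nb).length = h := by
        rw [pv_sout_length]; exact hnb
      rw [List.getD_eq_getElem?_getD,
        pv_sin_get? board ty h ((k : Int) + tx) k h _ y hprevlen]
      by_cases hcy : ty ≤ (y : Int) ∧ (y : Int) - ty < (h : Int) ∧ y < h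
      · rw [if_pos hcy, Option.getD_some, List.getElem?_set]
        have hplen : (((List.range k).foldl (fun (nb : List (List Int)) (src_x : Nat) =>
            if (src_x : Int) + tx < 0 ∨ (src_x : Int) + tx ≥ (w : Int) then nb
            else (List.range h).foldl (fun (nb : List (List Int)) (src_y : Nat) =>
              if (src_y : Int) + ty < 0 ∨ (src_y : Int) + ty ≥ (h : Int) then nb
              else nb.set ((src_y : Int) + ty).toNat
                ((nb.getD ((src_y : Int) + ty).toNat []).set ((src_x : Int) + tx).toNat
                  ((board.getD src_y []).getD src_x 0))) nb) nb).getD y []).length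
            = (board.getD y []).length := by
          rw [pv_sout_rowlen board tx ty w h k nb y hnb, hrowl]
        obtain ⟨hc1, hc2, _⟩ := hcy
        by_cases hx : ((k : Int) + tx).toNat = j
        · have hjw : j < w := by omega
          have hjlen : ((k : Int) + tx).toNat < (board.getD y []).length := by
            have := hw y hy; omega
          rw [if_pos hx, hplen, if_pos hjlen,
            if_pos (show tx ≤ (j : Int) ∧ (j : Int) - tx < ((k + 1 : Nat) : Int) ∧ j < w ∧ ty ≤ (y : Int) ∧ (y : Int) - ty < (h : Int) by push_cast; omega),
            show ((j : Int) - tx).toNat = k by omega]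
        · rw [if_neg hx, ih]
          by_cases hc : tx ≤ (j : Int) ∧ (j : Int) - tx < (k : Int) ∧ j < w ∧ ty ≤ (y : Int) ∧ (y : Int) - ty < (h : Int)
          · rw [if_pos hc, if_pos (by push_cast at hc ⊢; omega)]
          · rw [if_neg hc, if_neg (by push_cast at hc ⊢; omega)]
      · rw [if_neg hcy, ← List.getD_eq_getElem?_getD, ih]
        have hcf : ¬ (ty ≤ (y : Int) ∧ (y : Int) - ty < (h : Int)) := by
          push Not at hcy; omega
        rw [if_neg (by omega), if_neg (by omega)]

-- Pointwise characterisation of port A.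
theorem pv_A_len (board : List (List Int)) (tx ty d : Int) :
    (translate_board board tx ty d).length = board.length := by
  simp only [translate_board]
  rw [pv_blank_eq d board.length (board.headD []).length board rfl,
    pv_sout_length, List.length_map]

theorem pv_mapF_rowlen (board : List (List Int)) (d : Int) (w : Nat) (z : Nat) :
    ((board.map (fun r => (List.range w).foldl (fun r x => r.set x d) r)).getD z []).length
      = (board.getD z []).length := by
  by_cases hz : z < board.length
  · rw [List.getD_eq_getElem?_getD, List.getElem?_map, List.getElem?_eq_getElem hz]
    simp only [Option.map_some, Option.getD_some]
    rw [pv_rowfill_length (fun _ => d) w, List.getD_eq_getElem board [] hz]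
  · rw [List.getD_eq_getElem?_getD, List.getElem?_map,
      List.getElem?_eq_none (show board.length ≤ z by omega),
      List.getD_eq_getElem?_getD, List.getElem?_eq_none (show board.length ≤ z by omega)]
    rfl

theorem pv_A_get? (board : List (List Int)) (tx ty d : Int) (z j : Nat)
    (hz : z < board.length)
    (hw : ∀ u, u < board.length → (board.headD []).length ≤ (board.getD u []).length) :
    (((translate_board board tx ty d)).getD z [])[j]? =
      if tx ≤ (j : Int) ∧ (j : Int) - tx < ((board.headD []).length : Int) ∧
         j < (board.headD []).length ∧ ty ≤ (z : Int) ∧ (z : Int) - ty < (board.length : Int)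
      then some ((board.getD ((z : Int) - ty).toNat []).getD ((j : Int) - tx).toNat 0)
      else if j < (board.headD []).length ∧ j < (board.getD z []).length then some d
      else (board.getD z [])[j]? := by
  simp only [translate_board]
  rw [pv_blank_eq d board.length (board.headD []).length board rfl]
  rw [pv_sout_get? board tx ty (board.headD []).length board.length (board.headD []).length
    (board.map (fun r => (List.range (board.headD []).length).foldl (fun r x => r.set x d) r))
    z j hz (List.length_map _) (pv_mapF_rowlen board d (board.headD []).length) hw]
  by_cases hc : tx ≤ (j : Int) ∧ (j : Int) - tx < ((board.headD []).length : Int) ∧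
      j < (board.headD []).length ∧ ty ≤ (z : Int) ∧ (z : Int) - ty < (board.length : Int)
  · rw [if_pos hc, if_pos hc]
  · rw [if_neg hc, if_neg hc]
    have hFz : (board.map (fun r => (List.range (board.headD []).length).foldl
        (fun r x => r.set x d) r)).getD z []
        = (List.range (board.headD []).length).foldl (fun r x => r.set x d) (board.getD z []) := by
      rw [List.getD_eq_getElem?_getD, List.getElem?_map, List.getElem?_eq_getElem hz]
      simp only [Option.map_some, Option.getD_some]
      rw [List.getD_eq_getElem board [] hz]
    rw [hFz]
    have hrf : ((List.range (board.headD []).length).foldl (fun r x => r.set x d)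
        (board.getD z []))[j]? =
        if j < (board.headD []).length ∧ j < (board.getD z []).length then some d
        else (board.getD z [])[j]? :=
      pv_rowfill_get? (fun _ => d) (board.headD []).length (board.getD z []) j
    rw [hrf]

-- Pointwise characterisation of port B.
theorem pv_B_len (board : List (List Int)) (tx ty d : Int) :
    (translate_board_alt board tx ty d).length = board.length := by
  simp only [translate_board_alt]
  exact pv_outer_length (fun (y : Nat) (r : List Int) =>
    (List.range (board.headD []).length).foldl (fun (row : List Int) (x : Nat) =>
      if 0 ≤ (x : Int) - tx ∧ (x : Int) - tx < ((board.headD []).length : Int) ∧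
         0 ≤ (y : Int) - ty ∧ (y : Int) - ty < (board.length : Int) then
        row.set x ((board.getD ((y : Int) - ty).toNat []).getD ((x : Int) - tx).toNat 0)
      else row.set x d) r) board.length board

theorem pv_B_get? (board : List (List Int)) (tx ty d : Int) (z j : Nat)
    (hz : z < board.length) :
    (((translate_board_alt board tx ty d)).getD z [])[j]? =
      if j < (board.headD []).length ∧ j < (board.getD z []).length
      then some (if 0 ≤ (j : Int) - tx ∧ (j : Int) - tx < ((board.headD []).length : Int) ∧
          0 ≤ (z : Int) - ty ∧ (z : Int) - ty < (board.length : Int)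
        then (board.getD ((z : Int) - ty).toNat []).getD ((j : Int) - tx).toNat 0
        else d)
      else (board.getD z [])[j]? := by
  simp only [translate_board_alt]
  have hog : ((List.range board.length).foldl (fun (nb : List (List Int)) (y : Nat) =>
      nb.set y ((List.range (board.headD []).length).foldl (fun (row : List Int) (x : Nat) =>
        if 0 ≤ (x : Int) - tx ∧ (x : Int) - tx < ((board.headD []).length : Int) ∧
           0 ≤ (y : Int) - ty ∧ (y : Int) - ty < (board.length : Int) then
          row.set x ((board.getD ((y : Int) - ty).toNat []).getD ((x : Int) - tx).toNat 0)
        else row.set x d) (nb.getD y []))) board).getD z []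
      = (List.range (board.headD []).length).foldl (fun (row : List Int) (x : Nat) =>
        if 0 ≤ (x : Int) - tx ∧ (x : Int) - tx < ((board.headD []).length : Int) ∧
           0 ≤ (z : Int) - ty ∧ (z : Int) - ty < (board.length : Int) then
          row.set x ((board.getD ((z : Int) - ty).toNat []).getD ((x : Int) - tx).toNat 0)
        else row.set x d) (board.getD z []) := by
    rw [List.getD_eq_getElem?_getD]
    have := pv_outer_get? (fun (y : Nat) (r : List Int) =>
      (List.range (board.headD []).length).foldl (fun (row : List Int) (x : Nat) =>
        if 0 ≤ (x : Int) - tx ∧ (x : Int) - tx < ((board.headD []).length : Int) ∧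
           0 ≤ (y : Int) - ty ∧ (y : Int) - ty < (board.length : Int) then
          row.set x ((board.getD ((y : Int) - ty).toNat []).getD ((x : Int) - tx).toNat 0)
        else row.set x d) r) board.length board z le_rfl
    rw [this, if_pos hz]
    rfl
  rw [hog]
  have hlam : (fun (row : List Int) (x : Nat) =>
      if 0 ≤ (x : Int) - tx ∧ (x : Int) - tx < ((board.headD []).length : Int) ∧
         0 ≤ (z : Int) - ty ∧ (z : Int) - ty < (board.length : Int) then
        row.set x ((board.getD ((z : Int) - ty).toNat []).getD ((x : Int) - tx).toNat 0)
      else row.set x d)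
      = fun (row : List Int) (x : Nat) => row.set x
        (if 0 ≤ (x : Int) - tx ∧ (x : Int) - tx < ((board.headD []).length : Int) ∧
            0 ≤ (z : Int) - ty ∧ (z : Int) - ty < (board.length : Int)
         then (board.getD ((z : Int) - ty).toNat []).getD ((x : Int) - tx).toNat 0
         else d) := by
    funext row x
    by_cases hc : 0 ≤ (x : Int) - tx ∧ (x : Int) - tx < ((board.headD []).length : Int) ∧
        0 ≤ (z : Int) - ty ∧ (z : Int) - ty < (board.length : Int)
    · rw [if_pos hc, if_pos hc]
    · rw [if_neg hc, if_neg hc]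
  rw [hlam]
  exact pv_rowfill_get? (fun (x : Nat) =>
    if 0 ≤ (x : Int) - tx ∧ (x : Int) - tx < ((board.headD []).length : Int) ∧
       0 ≤ (z : Int) - ty ∧ (z : Int) - ty < (board.length : Int)
    then (board.getD ((z : Int) - ty).toNat []).getD ((x : Int) - tx).toNat 0
    else d) (board.headD []).length (board.getD z []) j

theorem translate_board_spec : Claim_equal_translate_board := by
  intro board tx ty d _ hpre
  obtain ⟨hne, hrows⟩ := hpre
  show translate_board board tx ty d = translate_board_alt board tx ty d
  have hw : ∀ u, u < board.length → (board.headD []).length ≤ (board.getD u []).length := by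
    intro u hu
    rw [List.getD_eq_getElem board [] hu]
    exact hrows _ (List.getElem_mem hu)
  apply List.ext_getElem?
  intro z
  by_cases hz : z < board.length
  · have hsome : ∀ (L : List (List Int)), z < L.length → L[z]? = some (L.getD z []) := by
      intro L hzL
      rw [List.getElem?_eq_getElem hzL, List.getD_eq_getElem L [] hzL]
    rw [hsome _ (show z < (translate_board board tx ty d).length by rw [pv_A_len]; exact hz),
      hsome _ (show z < (translate_board_alt board tx ty d).length by rw [pv_B_len]; exact hz)]
    congr 1
    apply List.ext_getElem?
    intro j
    rw [pv_A_get? board tx ty d z j hz hw, pv_B_get? board tx ty d z j hz]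
    by_cases hjw : j < (board.headD []).length
    · have hjr : j < (board.getD z []).length := by have := hw z hz; omega
      rw [if_pos (And.intro hjw hjr)]
      by_cases hc : 0 ≤ (j : Int) - tx ∧ (j : Int) - tx < ((board.headD []).length : Int) ∧
          0 ≤ (z : Int) - ty ∧ (z : Int) - ty < (board.length : Int)
      · rw [if_pos (show tx ≤ (j : Int) ∧ (j : Int) - tx < ((board.headD []).length : Int) ∧
            j < (board.headD []).length ∧ ty ≤ (z : Int) ∧ (z : Int) - ty < (board.length : Int) by
            omega), if_pos hc, if_pos (And.intro hjw hjr)]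
      · rw [if_neg (show ¬ (tx ≤ (j : Int) ∧ (j : Int) - tx < ((board.headD []).length : Int) ∧
            j < (board.headD []).length ∧ ty ≤ (z : Int) ∧ (z : Int) - ty < (board.length : Int)) by
            omega), if_neg hc]
        rw [if_pos (And.intro hjw hjr)]
    · rw [if_neg (show ¬ (tx ≤ (j : Int) ∧ (j : Int) - tx < ((board.headD []).length : Int) ∧
            j < (board.headD []).length ∧ ty ≤ (z : Int) ∧ (z : Int) - ty < (board.length : Int)) by
          omega),
        if_neg (show ¬ (j < (board.headD []).length ∧ j < (board.getD z []).length) by omega),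
        if_neg (show ¬ (j < (board.headD []).length ∧ j < (board.getD z []).length) by omega)]
  · rw [List.getElem?_eq_none (show (translate_board board tx ty d).length ≤ z by
        rw [pv_A_len]; omega),
      List.getElem?_eq_none (show (translate_board_alt board tx ty d).length ≤ z by
        rw [pv_B_len]; omega)]
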